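-- pv_equiv track=rewrite | github.com/yoshihikosuzuki/kmer-profile | src/_core/_class_rel.py | is_eq_suffix
-- ===== SOURCE A (Python) =====
-- def is_eq_suffix(eqs):
--     if eqs[len(eqs) - 1] != True:
--         return False
--     i = len(eqs) - 2
--     while i >= 0 and eqs[i]:
--         i -= 1
--     while i >= 0:
--         if eqs[i]:
--             return False
--         i -= 1
--     return True
-- ===== SOURCE B (Python) =====
-- def is_eq_suffix(eqs):
--     if eqs[len(eqs) - 1] != True:
--         return False
--     seen_true = False
--     for x in eqs:
--         if x:
--             seen_true = True
--         elif seen_true: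
--             return False
--     return True
-- ===== Notes on version B (the rewrite author's own statement) =====
-- stated objective: alternative
-- what changed: Replaces A's backward two-phase while-loop scan (skip trailing trues, then check the rest for a true) with a single forward pass maintaining a seen_true flag that rejects a false after a true.
import Mathlib
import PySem

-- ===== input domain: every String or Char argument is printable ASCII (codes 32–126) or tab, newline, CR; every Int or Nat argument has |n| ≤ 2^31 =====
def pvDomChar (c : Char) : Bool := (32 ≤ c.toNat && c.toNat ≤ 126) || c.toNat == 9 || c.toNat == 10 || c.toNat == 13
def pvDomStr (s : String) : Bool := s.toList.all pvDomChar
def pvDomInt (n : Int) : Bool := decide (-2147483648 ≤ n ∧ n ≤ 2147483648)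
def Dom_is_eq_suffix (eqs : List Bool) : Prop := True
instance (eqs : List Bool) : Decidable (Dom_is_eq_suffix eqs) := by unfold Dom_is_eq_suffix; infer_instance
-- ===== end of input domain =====

-- B replaces A's backward two-phase scan with a single forward pass keeping a seen_true flag
-- (objective: alternative decomposition, same O(n) cost).

-- ===== PORT A =====
-- second while loop: i counted down from fuel-1 to 0; returns False on a true element
def aLoop2 (eqs : List Bool) : Nat → Bool
  | 0 => true
  | k + 1 => if (PySem.List.pyGet? eqs (k : Int)).getD false then false else aLoop2 eqs k

-- first while loop: skip trailing trues; fuel = i + 1, returns final i + 1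
def aLoop1 (eqs : List Bool) : Nat → Nat
  | 0 => 0
  | k + 1 => if (PySem.List.pyGet? eqs (k : Int)).getD false then aLoop1 eqs k else k + 1

def is_eq_suffix (eqs : List Bool) : Bool :=
  -- eqs[len(eqs)-1] raises IndexError on []; excluded by Pre_ (getD's default is never used inside Pre_)
  if ((PySem.List.pyGet? eqs ((eqs.length : Int) - 1)).getD false) ≠ true then false
  else aLoop2 eqs (aLoop1 eqs (eqs.length - 1))

-- ===== PORT B =====
-- forward pass: seen_true flag; a false after a true rejects
def bLoop (seen : Bool) : List Bool → Bool
  | [] => true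
  | x :: rest => if x then bLoop true rest else if seen then false else bLoop seen rest

def is_eq_suffix_alt (eqs : List Bool) : Bool :=
  if ((PySem.List.pyGet? eqs ((eqs.length : Int) - 1)).getD false) ≠ true then false
  else bLoop false eqs

-- ===== PRECONDITION & SPEC =====
-- Pre_ excludes only the empty list, on which both A and B raise IndexError (eqs[len(eqs)-1]).
def Pre_is_eq_suffix (eqs : List Bool) : Prop := eqs ≠ []
instance (eqs : List Bool) : Decidable (Pre_is_eq_suffix eqs) := by unfold Pre_is_eq_suffix; infer_instance
def pvWitness_is_eq_suffix : List Bool := [false, true]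

def Spec_is_eq_suffix (eqs : List Bool) (out : Bool) : Prop := out = is_eq_suffix_alt eqs
instance (eqs : List Bool) (out : Bool) : Decidable (Spec_is_eq_suffix eqs out) := by unfold Spec_is_eq_suffix; infer_instance

-- ===== CLAIM (what is proved, stated in full; the proofs are below) =====
def Claim_equal_is_eq_suffix : Prop := ∀ (eqs : List Bool), Dom_is_eq_suffix eqs → Pre_is_eq_suffix eqs → Spec_is_eq_suffix eqs (is_eq_suffix eqs)

-- ===== LEMMAS AND PROOFS =====

-- canonical form: eqs is in false* true*  iff after dropping the leading falses all are true
def good (l : List Bool) : Bool := (l.dropWhile (fun x => !x)).all id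

theorem bLoop_true (l : List Bool) : bLoop true l = l.all id := by
  induction l with
  | nil => rfl
  | cons x t ih => cases x <;> simp [bLoop, ih]

theorem bLoop_false (l : List Bool) : bLoop false l = good l := by
  induction l with
  | nil => rfl
  | cons x t ih =>
    cases x
    · simpa [bLoop, good, List.dropWhile] using ih
    · simp [bLoop, good, List.dropWhile, bLoop_true]

theorem good_append_true (l : List Bool) : good (l ++ [true]) = good l := by
  induction l with
  | nil => rfl
  | cons x t ih =>
    cases x
    · simpa [good] using ih
    · simp [good, List.dropWhile]

theorem good_append_false (l : List Bool) : good (l ++ [false]) = l.all (fun x => !x) := by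
  induction l with
  | nil => rfl
  | cons x t ih =>
    cases x
    · simpa [good] using ih
    · simp [good]

theorem take_succ_get (eqs : List Bool) (k : Nat) (hk : k < eqs.length) :
    eqs.take (k + 1) = eqs.take k ++ [eqs[k]] := by
  rw [List.take_add_one, List.getElem?_eq_getElem hk]
  rfl

theorem pyGet_nat (eqs : List Bool) (k : Nat) (hk : k < eqs.length) :
    (PySem.List.pyGet? eqs (k : Int)).getD false = eqs[k] := by
  simp [PySem.List.pyGet?_natCast, List.getElem?_eq_getElem hk]

theorem aLoop2_eq (eqs : List Bool) (k : Nat) (hk : k ≤ eqs.length) :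
    aLoop2 eqs k = (eqs.take k).all (fun x => !x) := by
  induction k with
  | zero => rfl
  | succ k ih =>
    have hk' : k < eqs.length := hk
    rw [aLoop2, pyGet_nat eqs k hk', take_succ_get eqs k hk',
        ih (Nat.le_of_lt hk')]
    cases h : eqs[k] <;> simp [Bool.and_comm]

theorem aLoops_eq (eqs : List Bool) (k : Nat) (hk : k ≤ eqs.length) :
    aLoop2 eqs (aLoop1 eqs k) = good (eqs.take k) := by
  induction k with
  | zero => rfl
  | succ k ih =>
    have hk' : k < eqs.length := hk
    rw [aLoop1, pyGet_nat eqs k hk', take_succ_get eqs k hk']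
    cases h : eqs[k]
    · rw [if_neg (by simp), aLoop2_eq eqs (k + 1) hk, take_succ_get eqs k hk', h,
          good_append_false]
      simp
    · rw [if_pos rfl, ih (Nat.le_of_lt hk'), good_append_true]

theorem dropLast_concat_last (eqs : List Bool) (h : eqs ≠ []) :
    eqs.take (eqs.length - 1) ++ [eqs[eqs.length - 1]'(by
      have := List.length_pos_iff.mpr h; omega)] = eqs := by
  have := List.length_pos_iff.mpr h
  rw [← take_succ_get eqs (eqs.length - 1) (by omega)]
  simp [List.take_of_length_le, Nat.sub_add_cancel this]

-- ===== VERDICT (by name: the statement is the Claim_ definition above) =====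
theorem is_eq_suffix_spec : Claim_equal_is_eq_suffix := by
  intro eqs _ hpre
  unfold Spec_is_eq_suffix is_eq_suffix is_eq_suffix_alt
  have hlen : 0 < eqs.length := List.length_pos_iff.mpr hpre
  have hlt : eqs.length - 1 < eqs.length := by omega
  have hidx : ((eqs.length : Int) - 1) = ((eqs.length - 1 : Nat) : Int) := by
    push_cast [Nat.cast_sub hlen]; ring
  rw [hidx, pyGet_nat eqs (eqs.length - 1) hlt]
  cases h : eqs[eqs.length - 1] with
  | false => simp
  | true =>
    simp only [ne_eq, not_true_eq_false, if_false]
    rw [aLoops_eq eqs (eqs.length - 1) (by omega), bLoop_false]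
    conv_rhs => rw [← dropLast_concat_last eqs hpre]
    rw [h, good_append_true]
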